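-- pv_equiv track=rewrite | github.com/Chemokoren/Algorithms-1 | GFG/Arrays/Searching/maximum_triplet_sum_array.py | my_tests_three
-- ===== SOURCE A (Python) =====
-- def my_tests_three(arr):
--     big, bigger =0,0
--
--     biggest =arr[0]
--     for i in range(1,len(arr)):
--
--         if arr[i] > biggest:
--             if biggest > bigger:
--                 if bigger > big:
--                     big = bigger
--                 bigger =biggest
--             biggest =arr[i]
--         else:
--             if arr[i] > bigger:
--                 if bigger > big:
--                     big = bigger
--                 bigger =arr[i]
--             else:
--                 if arr[i] > big:
--                     big = arr[i]
--
--     return (big + bigger + biggest)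
-- ===== SOURCE B (Python) =====
-- def my_tests_three(arr):
--     return sum(sorted(list(arr) + [0, 0])[-3:])
-- ===== Notes on version B (the rewrite author's own statement) =====
-- stated objective: simpler
-- what changed: replaces the single-pass three-variable tracking (whose strict 'biggest > bigger' demotion guard silently drops a duplicated running maximum) by a one-liner: sort the list padded with two zeros and sum the last three elements
-- intended difference: On arrays where some positive value is the running maximum occurring exactly twice before being strictly exceeded, never reappears afterwards, and exactly one element of the array exceeds it, A's strict demotion guard drops one copy of that value and returns an undercount; B returns the intended sum of the three largest elements of the zero-padded array (on the witness [1, 1, 2] A returns 3, B returns 4). — e.g. on my_tests_three([1, 1, 2]): A returns 3, B returns 4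
import Mathlib
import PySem

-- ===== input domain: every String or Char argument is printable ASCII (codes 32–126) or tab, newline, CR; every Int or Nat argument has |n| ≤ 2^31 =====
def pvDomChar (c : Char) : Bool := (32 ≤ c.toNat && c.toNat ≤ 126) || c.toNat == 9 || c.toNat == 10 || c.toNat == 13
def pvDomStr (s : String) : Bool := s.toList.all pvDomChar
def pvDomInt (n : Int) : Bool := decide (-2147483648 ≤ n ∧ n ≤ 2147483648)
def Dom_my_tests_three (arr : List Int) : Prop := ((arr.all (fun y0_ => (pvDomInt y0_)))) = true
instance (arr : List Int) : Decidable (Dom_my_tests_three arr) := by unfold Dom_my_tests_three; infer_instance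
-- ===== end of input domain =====

-- B replaces A's single-pass three-variable tracking by "sort arr+[0,0], sum the last three";
-- on the inputs of D_ below (where A's strict demotion guard drops a duplicated running
-- maximum) B returns the intended sum of the three largest; on empty arr, excluded by Pre_
-- because A raises IndexError there, B's own algorithm returns 0.

-- ===== PORT A =====
-- the loop body of A: state (big, bigger, biggest), element x
def pvStepA (s : Int × Int × Int) (x : Int) : Int × Int × Int :=
  if x > s.2.2 then
    if s.2.2 > s.2.1 then
      ((if s.2.1 > s.1 then s.2.1 else s.1), s.2.2, x)
    else (s.1, s.2.1, x)
  else
    if x > s.2.1 then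
      ((if s.2.1 > s.1 then s.2.1 else s.1), x, s.2.2)
    else
      if x > s.1 then (x, s.2.1, s.2.2) else s

def my_tests_three (arr : List Int) : Int :=
  -- big, bigger = 0, 0; biggest = arr[0]  (arr[0] raises on []: Pre_ excludes [])
  let init : Int × Int × Int := (0, 0, PySem.List.pyGetD arr 0 0)
  -- for i in range(1, len(arr)): ...
  let s := (PySem.List.pyRange 1 (PySem.List.len arr)).foldl
    (fun s i => pvStepA s (PySem.List.pyGetD arr i 0)) init
  s.1 + s.2.1 + s.2.2

-- ===== PORT B =====
def my_tests_three_alt (arr : List Int) : Int :=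
  (PySem.List.slice (PySem.List.sorted (arr ++ [0, 0]) (fun x => x)) (some (-3))).sum

-- ===== PRECONDITION & SPEC =====
-- Pre_ excludes only the empty list, on which A raises IndexError reading its first element.
def Pre_my_tests_three (arr : List Int) : Prop := arr ≠ []
instance (arr : List Int) : Decidable (Pre_my_tests_three arr) := by
  unfold Pre_my_tests_three; infer_instance
def pvWitness_my_tests_three : List Int := [3, 1, 2]

-- On arrays where some positive value is the running maximum occurring exactly twice before being
-- strictly exceeded, never reappears afterwards, and exactly one element of the array exceeds it,
-- A's strict demotion guard 'biggest > bigger' drops one copy of that value and A undercounts;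
-- B returns the intended sum of the three largest elements of the zero-padded array.
def D_my_tests_three (arr : List Int) : Prop :=
  ∃ k ∈ List.range arr.length,
    0 < (arr.take k).foldl max 0 ∧
    (arr.take k).foldl max 0 < arr.getD k 0 ∧
    (arr.take k).count ((arr.take k).foldl max 0) = 2 ∧
    (arr.drop (k + 1)).count ((arr.take k).foldl max 0) = 0 ∧
    arr.countP (fun y => decide ((arr.take k).foldl max 0 < y)) = 1
instance (arr : List Int) : Decidable (D_my_tests_three arr) := by
  unfold D_my_tests_three; infer_instance

def Spec_my_tests_three (arr : List Int) (out : Int) : Prop :=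
  ¬ D_my_tests_three arr → out = my_tests_three_alt arr
instance (arr : List Int) (out : Int) : Decidable (Spec_my_tests_three arr out) := by
  unfold Spec_my_tests_three; infer_instance

def pvDiffWitness_my_tests_three : List Int := [1, 1, 2]
def pvDiffWitnessOut_my_tests_three : Int × Int := (3, 4)

-- ===== CLAIM (what is proved, stated in full; the proofs are below) =====
def Claim_unchanged_my_tests_three : Prop := ∀ (arr : List Int), Dom_my_tests_three arr → Pre_my_tests_three arr → Spec_my_tests_three arr (my_tests_three arr)
def Claim_changed_my_tests_three : Prop := Dom_my_tests_three (pvDiffWitness_my_tests_three) ∧ Pre_my_tests_three (pvDiffWitness_my_tests_three) ∧ D_my_tests_three (pvDiffWitness_my_tests_three) ∧ my_tests_three (pvDiffWitness_my_tests_three) = pvDiffWitnessOut_my_tests_three.1 ∧ my_tests_three_alt (pvDiffWitness_my_tests_three) = pvDiffWitnessOut_my_tests_three.2 ∧ pvDiffWitnessOut_my_tests_three.1 ≠ pvDiffWitnessOut_my_tests_three.2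

def Claim_exact_my_tests_three : Prop := ∀ (arr : List Int), Dom_my_tests_three arr → Pre_my_tests_three arr → D_my_tests_three arr → my_tests_three arr ≠ my_tests_three_alt arr

-- ===== LEMMAS AND PROOFS =====

-- The three shapes of A's loop state after processing the prefix `seen` (`rest` still to come):
-- every element seen so far is negative (state (0, 0, max));
def pvInvN (seen : List Int) (s : Int × Int × Int) : Prop :=
  s.1 = 0 ∧ s.2.1 = 0 ∧ s.2.2 < 0 ∧
  ∃ u : List Int, (u ++ [s.2.2, 0, 0]).Perm (seen ++ [0, 0]) ∧
    (u ++ [s.2.2, 0, 0]).Pairwise (· ≤ ·)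

-- the state holds exactly the three largest of seen+[0,0];
def pvInvE (seen : List Int) (s : Int × Int × Int) : Prop :=
  0 ≤ s.1 ∧
  ∃ u : List Int, (u ++ [s.1, s.2.1, s.2.2]).Perm (seen ++ [0, 0]) ∧
    (u ++ [s.1, s.2.1, s.2.2]).Pairwise (· ≤ ·)

-- a copy of the (duplicated, then exceeded) value s.2.1 was dropped; a repairing/masking
-- element ≥ s.2.1 is still promised in `rest`.
def pvInvD (seen rest : List Int) (s : Int × Int × Int) : Prop :=
  0 ≤ s.1 ∧ s.1 < s.2.1 ∧ s.2.1 < s.2.2 ∧ (∃ y ∈ rest, s.2.1 ≤ y) ∧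
  ∃ u : List Int, (u ++ [s.1, s.2.1, s.2.1, s.2.2]).Perm (seen ++ [0, 0]) ∧
    (u ++ [s.1, s.2.1, s.2.1, s.2.2]).Pairwise (· ≤ ·)

def pvInv (seen rest : List Int) (s : Int × Int × Int) : Prop :=
  pvInvN seen s ∨ pvInvE seen s ∨ pvInvD seen rest s

-- a step extends seen++[0,0] by x, up to permutation
lemma pv_perm_pad (seen l l' : List Int) (x : Int) (h : l.Perm (seen ++ [0, 0]))
    (h2 : l'.Perm (l ++ [x])) : l'.Perm ((seen ++ [x]) ++ [0, 0]) := by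
  refine h2.trans ((h.append_right [x]).trans ?_)
  have h3 : (([0, 0] : List Int) ++ [x]).Perm ([x] ++ [0, 0]) := List.perm_append_comm
  have h4 : (seen ++ ([0, 0] ++ [x])).Perm (seen ++ ([x] ++ [0, 0])) :=
    List.Perm.append_left seen h3
  simpa using h4

lemma pv_foldl_max_le (l : List Int) : ∀ (i m : Int), i ≤ m → (∀ y ∈ l, y ≤ m) →
    l.foldl max i ≤ m := by
  induction l with
  | nil => intro i m h _; simpa using h
  | cons z t ih =>
    intro i m h hb
    simp only [List.foldl_cons]
    exact ih _ m (max_le h (hb z (by simp))) (fun y hy => hb y (by simp [hy]))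

lemma pv_foldl_max_eq (l : List Int) (m : Int) (hm : m ∈ l) (hb : ∀ y ∈ l, y ≤ m)
    (h0 : 0 ≤ m) : l.foldl max 0 = m :=
  le_antisymm (pv_foldl_max_le l 0 m h0 hb) ((PySem.List.le_foldl_max l (0 : Int)).2 m hm)

-- decompositions of sortedness of u ++ [p,q,r] / u ++ [p,q,r,t]
lemma pv_pw3 (u : List Int) (p q r : Int) :
    (u ++ [p, q, r]).Pairwise (· ≤ ·) ↔
      u.Pairwise (· ≤ ·) ∧ (∀ y ∈ u, y ≤ p) ∧ p ≤ q ∧ q ≤ r := by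
  rw [List.pairwise_append]
  constructor
  · rintro ⟨h1, h2, h3⟩
    simp [List.pairwise_cons] at h2
    exact ⟨h1, fun y hy => h3 y hy p (by simp), by tauto, by tauto⟩
  · rintro ⟨h1, h2, h3, h4⟩
    refine ⟨h1, by simp [List.pairwise_cons]; omega, ?_⟩
    intro y hy z hz
    have := h2 y hy
    simp at hz
    rcases hz with rfl | rfl | rfl <;> omega

lemma pv_pw4 (u : List Int) (p q r t : Int) :
    (u ++ [p, q, r, t]).Pairwise (· ≤ ·) ↔
      u.Pairwise (· ≤ ·) ∧ (∀ y ∈ u, y ≤ p) ∧ p ≤ q ∧ q ≤ r ∧ r ≤ t := by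
  rw [List.pairwise_append]
  constructor
  · rintro ⟨h1, h2, h3⟩
    simp [List.pairwise_cons] at h2
    exact ⟨h1, fun y hy => h3 y hy p (by simp), by tauto, by tauto, by tauto⟩
  · rintro ⟨h1, h2, h3, h4, h5⟩
    refine ⟨h1, by simp [List.pairwise_cons]; omega, ?_⟩
    intro y hy z hz
    have := h2 y hy
    simp at hz
    rcases hz with rfl | rfl | rfl | rfl <;> omega

lemma pv_pw5 (u : List Int) (p q r t w : Int) :
    (u ++ [p, q, r, t, w]).Pairwise (· ≤ ·) ↔
      u.Pairwise (· ≤ ·) ∧ (∀ y ∈ u, y ≤ p) ∧ p ≤ q ∧ q ≤ r ∧ r ≤ t ∧ t ≤ w := by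
  rw [List.pairwise_append]
  constructor
  · rintro ⟨h1, h2, h3⟩
    simp [List.pairwise_cons] at h2
    exact ⟨h1, fun y hy => h3 y hy p (by simp), by tauto, by tauto, by tauto, by tauto⟩
  · rintro ⟨h1, h2, h3, h4, h5, h6⟩
    refine ⟨h1, by simp [List.pairwise_cons]; omega, ?_⟩
    intro y hy z hz
    have := h2 y hy
    simp at hz
    rcases hz with rfl | rfl | rfl | rfl | rfl <;> omega

-- the "element too small to change the state" step: re-sort it into u
lemma pv_sorted_ext (u tl seen : List Int) (x : Int)
    (hperm : (u ++ tl).Perm (seen ++ [0, 0]))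
    (hpw : (u ++ tl).Pairwise (· ≤ ·))
    (hx : ∀ y ∈ tl, x ≤ y) :
    ((PySem.List.sorted (x :: u) (fun t => t)) ++ tl).Perm ((seen ++ [x]) ++ [0, 0]) ∧
    ((PySem.List.sorted (x :: u) (fun t => t)) ++ tl).Pairwise (· ≤ ·) := by
  have hsp := PySem.List.sorted_perm (x :: u) (fun t => t) false
  constructor
  · refine pv_perm_pad seen _ _ x hperm ?_
    refine (hsp.append_right tl).trans ?_
    have : ((x :: (u ++ tl))).Perm ((u ++ tl) ++ [x]) := (List.perm_append_singleton x _).symm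
    simpa using this
  · rw [List.pairwise_append] at hpw ⊢
    refine ⟨by simpa using PySem.List.sorted_pairwise (x :: u) (fun t => t), hpw.2.1, ?_⟩
    intro z hz y hy
    have hz' : z ∈ x :: u := hsp.mem_iff.mp hz
    rcases List.mem_cons.mp hz' with rfl | hz''
    · exact hx y hy
    · exact hpw.2.2 z hz'' y hy

-- at the moment a copy of b is dropped, ¬D_ promises a repairing/masking element in rest
lemma pv_promise (seen rest : List Int) (x a b : Int) (u : List Int)
    (hnd : ¬ D_my_tests_three (seen ++ x :: rest))
    (hperm : (u ++ [a, b, b]).Perm (seen ++ [0, 0]))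
    (hub : ∀ y ∈ u, y ≤ a) (hab : a < b) (h0 : 0 ≤ a) (hx : b < x) :
    ∃ y ∈ rest, b ≤ y := by
  by_contra hcon
  push_neg at hcon
  apply hnd
  refine ⟨seen.length, by simp, ?_⟩
  have hmem : ∀ y ∈ seen, y ≤ b := by
    intro y hy
    have : y ∈ u ++ [a, b, b] := hperm.mem_iff.mpr (by simp [hy])
    simp at this
    rcases this with h | h | h | h
    · exact le_trans (hub y h) (le_of_lt hab)
    all_goals omega
  have hbmem : b ∈ seen := by
    have : b ∈ seen ++ [0, 0] := hperm.mem_iff.mp (by simp)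
    simp at this
    rcases this with h | h
    · exact h
    · omega
  have htake : (seen ++ x :: rest).take seen.length = seen := List.take_left
  have hM : ((seen ++ x :: rest).take seen.length).foldl max 0 = b := by
    rw [htake]; exact pv_foldl_max_eq seen b hbmem hmem (by omega)
  have hgetD : (seen ++ x :: rest).getD seen.length 0 = x := by
    simp [List.getD_eq_getElem?_getD]
  have hdrop : (seen ++ x :: rest).drop (seen.length + 1) = rest := by
    have h : seen ++ x :: rest = (seen ++ [x]) ++ rest := by simp
    rw [h, List.drop_left' (by simp)]
  have hcount_seen : seen.count b = 2 := by
    have h1 := hperm.count_eq b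
    have hu : u.count b = 0 := by
      rw [List.count_eq_zero]
      intro hmem'
      have := hub b hmem'
      omega
    have hane : a ≠ b := by omega
    have hzb : (0 : Int) ≠ b := by omega
    simp [List.count_append, hu, List.count_cons, hane, hzb] at h1
    omega
  have hcountP_seen : seen.countP (fun y => decide (b < y)) = 0 := by
    rw [List.countP_eq_zero]
    intro y hy
    simpa using not_lt.mpr (hmem y hy)
  have hcount_rest : rest.count b = 0 := by
    rw [List.count_eq_zero]
    intro hmem'
    exact absurd (le_refl b) (not_le.mpr (hcon b hmem'))
  have hcountP_rest : rest.countP (fun y => decide (b < y)) = 0 := by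
    rw [List.countP_eq_zero]
    intro y hy
    simpa using not_lt.mpr (le_of_lt (hcon y hy))
  rw [hM, htake, hgetD, hdrop]
  refine ⟨by omega, hx, hcount_seen, hcount_rest, ?_⟩
  simp [List.countP_append, hcountP_seen, hcountP_rest, hx]

theorem pv_step (arr seen rest : List Int) (x : Int) (s : Int × Int × Int)
    (harr : arr = seen ++ x :: rest) (hnd : ¬ D_my_tests_three arr)
    (hinv : pvInv seen (x :: rest) s) : pvInv (seen ++ [x]) rest (pvStepA s x) := by
  obtain ⟨a, b, c⟩ := s
  subst harr
  unfold pvStepA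
  simp only
  rcases hinv with ⟨ha, hb, hc, u, hperm, hpw⟩ | ⟨h0, u, hperm, hpw⟩ |
    ⟨h0, hab, hbc, hpro, u, hperm, hpw⟩
  -- ============ case N : all seen negative, s = (0, 0, c), c < 0 ============
  · simp only at ha hb hc hperm hpw
    subst ha; subst hb
    obtain ⟨hupw, hub, hc0, -⟩ := (pv_pw3 u c 0 0).mp hpw
    by_cases h1 : x > c
    · rw [if_pos h1, if_neg (by omega : ¬ c > 0)]
      by_cases h3 : x < 0
      · -- still all negative
        left
        refine ⟨rfl, rfl, h3, u ++ [c], ?_, ?_⟩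
        · refine pv_perm_pad seen _ _ x hperm ?_
          have h : (u ++ [c, x, 0, 0]).Perm (u ++ [c, 0, 0, x]) :=
            List.Perm.append_left u (.cons c ((List.perm_append_singleton x [0, 0]).symm))
          simpa using h
        · simp only [List.append_assoc, List.cons_append, List.nil_append]
          exact (pv_pw4 u c x 0 0).mpr ⟨hupw, hub, by omega, by omega, by omega⟩
      · -- x ≥ 0 : becomes the top-3 state (0, 0, x)
        right; left
        refine ⟨le_refl 0, u ++ [c], ?_, ?_⟩
        · exact pv_perm_pad seen _ _ x hperm (by simp)
        · simp only [List.append_assoc, List.cons_append, List.nil_append]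
          exact (pv_pw4 u c 0 0 x).mpr ⟨hupw, hub, by omega, by omega, by omega⟩
    · rw [if_neg h1, if_neg (by omega : ¬ x > 0), if_neg (by omega : ¬ x > 0)]
      left
      refine ⟨rfl, rfl, hc, PySem.List.sorted (x :: u) (fun t => t), ?_⟩
      exact pv_sorted_ext u [c, 0, 0] seen x hperm hpw
        (by intro y hy; simp at hy; rcases hy with rfl | rfl | rfl <;> omega)
  -- ============ case E : s = (a, b, c) is the top-3 of seen++[0,0] ============
  · simp only at h0 hperm hpw
    obtain ⟨hupw, hub, hab, hbc⟩ := (pv_pw3 u a b c).mp hpw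
    by_cases h1 : x > c
    · by_cases h2 : c > b
      · rw [if_pos h1, if_pos h2]
        have hba : (if b > a then b else a) = b := by split <;> omega
        rw [hba]
        right; left
        refine ⟨show (0:Int) ≤ b by omega, u ++ [a], ?_, ?_⟩
        · exact pv_perm_pad seen _ _ x hperm (by simp)
        · simp only [List.append_assoc, List.cons_append, List.nil_append]
          exact (pv_pw4 u a b c x).mpr ⟨hupw, hub, by omega, by omega, by omega⟩
      · rw [if_pos h1, if_neg h2]
        have hcb : c = b := by omega
        subst hcb
        by_cases h3 : a < c
        · -- the drop : a copy of the duplicated maximum is lost, promise comes from ¬D_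
          right; right
          refine ⟨h0, show a < c by omega, show c < x by omega,
            pv_promise seen rest x a c u hnd hperm hub h3 h0 (by omega), u, ?_, ?_⟩
          · exact pv_perm_pad seen _ _ x hperm (by simp)
          · simp only [List.append_assoc, List.cons_append, List.nil_append]
            exact (pv_pw4 u a c c x).mpr ⟨hupw, hub, by omega, by omega, by omega⟩
        · -- a = b = c : the lost copy is still held in big
          have hba : c = a := by omega
          subst hba
          right; left
          refine ⟨h0, u ++ [c], ?_, ?_⟩
          · exact pv_perm_pad seen _ _ x hperm (by simp)
          · simp only [List.append_assoc, List.cons_append, List.nil_append]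
            exact (pv_pw4 u c c c x).mpr ⟨hupw, hub, by omega, by omega, by omega⟩
    · by_cases h2 : x > b
      · rw [if_neg h1, if_pos h2]
        have hba : (if b > a then b else a) = b := by split <;> omega
        rw [hba]
        right; left
        refine ⟨show (0:Int) ≤ b by omega, u ++ [a], ?_, ?_⟩
        · refine pv_perm_pad seen _ _ x hperm ?_
          have h : (u ++ [a, b, x, c]).Perm (u ++ [a, b, c, x]) :=
            List.Perm.append_left u (.cons a (.cons b (List.Perm.swap c x [])))
          simpa using h
        · simp only [List.append_assoc, List.cons_append, List.nil_append]
          exact (pv_pw4 u a b x c).mpr ⟨hupw, hub, by omega, by omega, by omega⟩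
      · by_cases h3 : x > a
        · rw [if_neg h1, if_neg h2, if_pos h3]
          right; left
          refine ⟨show (0:Int) ≤ x by omega, u ++ [a], ?_, ?_⟩
          · refine pv_perm_pad seen _ _ x hperm ?_
            have h : (u ++ [a, x, b, c]).Perm (u ++ [a, b, c, x]) :=
              List.Perm.append_left u (.cons a ((List.perm_append_singleton x [b, c]).symm))
            simpa using h
          · simp only [List.append_assoc, List.cons_append, List.nil_append]
            exact (pv_pw4 u a x b c).mpr ⟨hupw, hub, by omega, by omega, by omega⟩
        · rw [if_neg h1, if_neg h2, if_neg h3]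
          right; left
          have hse := pv_sorted_ext u [a, b, c] seen x hperm hpw
            (by intro y hy; simp at hy; rcases hy with rfl | rfl | rfl <;> omega)
          exact ⟨h0, _, hse.1, hse.2⟩
  -- ============ case D : a copy of b was dropped, repair promised in x :: rest ============
  · simp only at h0 hab hbc hpro hperm hpw
    obtain ⟨hupw, hub, -, -, -⟩ := (pv_pw4 u a b b c).mp hpw
    by_cases h1 : x > c
    · -- new maximum : the demotion chain fires fully and repairs the state
      rw [if_pos h1, if_pos (by omega : c > b)]
      have hba : (if b > a then b else a) = b := by split <;> omega
      rw [hba]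
      right; left
      refine ⟨show (0:Int) ≤ b by omega, u ++ [a, b], ?_, ?_⟩
      · exact pv_perm_pad seen _ _ x hperm (by simp)
      · simp only [List.append_assoc, List.cons_append, List.nil_append]
        exact (pv_pw5 u a b b c x).mpr ⟨hupw, hub, by omega, by omega, by omega, by omega⟩
    · by_cases h2 : x > b
      · -- b < x ≤ c : masks the lost copy
        rw [if_neg h1, if_pos h2]
        have hba : (if b > a then b else a) = b := by split <;> omega
        rw [hba]
        right; left
        refine ⟨show (0:Int) ≤ b by omega, u ++ [a, b], ?_, ?_⟩
        · refine pv_perm_pad seen _ _ x hperm ?_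
          have h : (u ++ [a, b, b, x, c]).Perm (u ++ [a, b, b, c, x]) :=
            List.Perm.append_left u (.cons a (.cons b (.cons b (List.Perm.swap c x []))))
          simpa using h
        · simp only [List.append_assoc, List.cons_append, List.nil_append]
          exact (pv_pw5 u a b b x c).mpr ⟨hupw, hub, by omega, by omega, by omega, by omega⟩
      · by_cases h3 : x > a
        · rw [if_neg h1, if_neg h2, if_pos h3]
          by_cases h4 : x = b
          · -- x = b : the lost copy of b is restored into big
            subst h4
            right; left
            refine ⟨show (0:Int) ≤ x by omega, u ++ [a, x], ?_, ?_⟩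
            · refine pv_perm_pad seen _ _ x hperm ?_
              have h : (u ++ [a, x, x, x, c]).Perm (u ++ [a, x, x, c, x]) :=
                List.Perm.append_left u (.cons a (.cons x (.cons x (List.Perm.swap c x []))))
              simpa using h
            · simp only [List.append_assoc, List.cons_append, List.nil_append]
              exact (pv_pw5 u a x x x c).mpr ⟨hupw, hub, by omega, by omega, by omega, by omega⟩
          · -- a < x < b : still in deficit
            right; right
            refine ⟨show (0:Int) ≤ x by omega, show x < b by omega, show b < c by omega, ?_,
              u ++ [a], ?_, ?_⟩
            · obtain ⟨y, hy, hvy⟩ := hpro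
              rcases List.mem_cons.mp hy with rfl | hy'
              · omega
              · exact ⟨y, hy', hvy⟩
            · refine pv_perm_pad seen _ _ x hperm ?_
              have h : (u ++ [a, x, b, b, c]).Perm (u ++ [a, b, b, c, x]) :=
                List.Perm.append_left u (.cons a ((List.perm_append_singleton x [b, b, c]).symm))
              simpa using h
            · simp only [List.append_assoc, List.cons_append, List.nil_append]
              exact (pv_pw5 u a x b b c).mpr ⟨hupw, hub, by omega, by omega, by omega, by omega⟩
        · rw [if_neg h1, if_neg h2, if_neg h3]
          right; right
          have hse := pv_sorted_ext u [a, b, b, c] seen x hperm hpw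
            (by intro y hy; simp at hy; rcases hy with rfl | rfl | rfl | rfl <;> omega)
          refine ⟨h0, hab, hbc, ?_, _, hse.1, hse.2⟩
          obtain ⟨y, hy, hvy⟩ := hpro
          rcases List.mem_cons.mp hy with rfl | hy'
          · omega
          · exact ⟨y, hy', hvy⟩

theorem pv_main (arr : List Int) (hnd : ¬ D_my_tests_three arr) :
    ∀ (rest seen : List Int) (s : Int × Int × Int), arr = seen ++ rest →
      pvInv seen rest s →
      pvInvN arr (rest.foldl pvStepA s) ∨ pvInvE arr (rest.foldl pvStepA s) := by
  intro rest
  induction rest with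
  | nil =>
    intro seen s harr hinv
    simp only [List.append_nil] at harr
    subst harr
    rcases hinv with h | h | h
    · exact Or.inl h
    · exact Or.inr h
    · rcases h.2.2.2.1 with ⟨y, hy, _⟩
      simp at hy
  | cons x rest ih =>
    intro seen s harr hinv
    have := pv_step arr seen rest x s harr hnd hinv
    simpa using ih (seen ++ [x]) (pvStepA s x) (by simp [harr]) this

lemma pv_alt_eq (arr u tl : List Int) (hlen : tl.length = 3)
    (hperm : (u ++ tl).Perm (arr ++ [0, 0])) (hpw : (u ++ tl).Pairwise (· ≤ ·)) :
    my_tests_three_alt arr = tl.sum := by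
  unfold my_tests_three_alt
  rw [PySem.List.sorted_id_eq_of_perm_of_pairwise _ _ hperm hpw]
  rw [PySem.List.slice_from_neg_ofNat _ 3 (by omega)]
  have h1 : (u ++ tl).length - 3 = u.length := by simp [hlen]
  rw [h1, List.drop_left]

theorem pv_final (arr : List Int) (s : Int × Int × Int)
    (h : pvInvN arr s ∨ pvInvE arr s) :
    my_tests_three_alt arr = s.1 + s.2.1 + s.2.2 := by
  rcases h with ⟨ha, hb, _, u, hperm, hpw⟩ | ⟨_, u, hperm, hpw⟩
  · rw [pv_alt_eq arr u [s.2.2, 0, 0] (by simp) hperm hpw]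
    simp [ha, hb]
  · rw [pv_alt_eq arr u [s.1, s.2.1, s.2.2] (by simp) hperm hpw]
    simp; ring

-- ===== tightness: inside D_ the two programs always differ =====

-- state invariant over a prefix whose elements are ≤ M; n = copies of M seen so far
def pvQ (M : Int) (n : Nat) (s : Int × Int × Int) : Prop :=
  s.1 ≤ s.2.1 ∧ 0 ≤ s.1 ∧ s.2.1 ≤ M ∧ s.2.2 ≤ M ∧
  (s.2.2 = M ↔ 1 ≤ n) ∧ (s.2.1 = M ↔ 2 ≤ n) ∧ (s.1 = M → 3 ≤ n)

lemma pv_stepQ (M y a b c : Int) (n : Nat) (hy : y ≤ M)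
    (hq : pvQ M n (a, b, c)) :
    pvQ M (n + (if y = M then 1 else 0)) (pvStepA (a, b, c) y) := by
  obtain ⟨c1, c2, c3, c4, c5, c6, c7⟩ := hq
  simp only at c1 c2 c3 c4 c5 c6 c7
  have h5 : (c = M ∧ 1 ≤ n) ∨ (c ≠ M ∧ n = 0) := by
    by_cases h : c = M
    · exact Or.inl ⟨h, c5.mp h⟩
    · refine Or.inr ⟨h, ?_⟩
      by_cases h1 : 1 ≤ n
      · exact absurd (c5.mpr h1) h
      · omega
  have h6 : (b = M ∧ 2 ≤ n) ∨ (b ≠ M ∧ n ≤ 1) := by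
    by_cases h : b = M
    · exact Or.inl ⟨h, c6.mp h⟩
    · refine Or.inr ⟨h, ?_⟩
      by_cases h1 : 2 ≤ n
      · exact absurd (c6.mpr h1) h
      · omega
  have h7 : (a = M ∧ 3 ≤ n) ∨ a ≠ M := by
    by_cases h : a = M
    · exact Or.inl ⟨h, c7 h⟩
    · exact Or.inr h
  unfold pvStepA pvQ
  simp only
  rcases h5 with ⟨h5a, h5b⟩ | ⟨h5a, h5b⟩ <;> rcases h6 with ⟨h6a, h6b⟩ | ⟨h6a, h6b⟩ <;>
    rcases h7 with ⟨h7a, h7b⟩ | h7a <;>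
    split_ifs <;> simp only <;>
    refine ⟨by omega, by omega, by omega, by omega, ⟨fun _ => by omega, fun _ => by omega⟩,
      ⟨fun _ => by omega, fun _ => by omega⟩, fun _ => by omega⟩

lemma pv_foldQ (M : Int) : ∀ (q : List Int) (s : Int × Int × Int) (n : Nat),
    (∀ y ∈ q, y ≤ M) → pvQ M n s →
    pvQ M (n + q.count M) (q.foldl pvStepA s) := by
  intro q
  induction q with
  | nil => intro s n _ h; simpa using h
  | cons y t ih =>
    intro s n hub h
    obtain ⟨a, b, c⟩ := s
    have hs := pv_stepQ M y a b c n (hub y (by simp)) h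
    have h2 := ih (pvStepA (a, b, c) y) (n + (if y = M then 1 else 0))
      (fun z hz => hub z (by simp [hz])) hs
    have hn : n + (y :: t).count M = n + (if y = M then 1 else 0) + t.count M := by
      simp only [List.count_cons, beq_iff_eq]
      split_ifs <;> omega
    rw [List.foldl_cons, hn]
    exact h2

lemma pv_initQ (M h : Int) (hh : h ≤ M) (hM : 0 < M) :
    pvQ M (if h = M then 1 else 0) (0, 0, h) := by
  unfold pvQ
  simp only
  split_ifs <;>
    refine ⟨le_refl 0, le_refl 0, by omega, hh, ⟨fun _ => by omega, fun _ => by omega⟩,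
      ⟨fun _ => by omega, fun _ => by omega⟩, fun _ => by omega⟩

-- after the drop the state keeps (·, v, w) while every remaining element is below v
lemma pv_fold_low : ∀ (r : List Int) (g v w : Int), (∀ y ∈ r, y < v) → g < v → v < w →
    ∃ g', r.foldl pvStepA (g, v, w) = (g', v, w) ∧ g' < v := by
  intro r
  induction r with
  | nil => exact fun g v w _ hg hv => ⟨g, rfl, hg⟩
  | cons y t ih =>
    intro g v w hub hg hv
    have hy : y < v := hub y (by simp)
    have hstep : pvStepA (g, v, w) y = if y > g then (y, v, w) else (g, v, w) := by
      unfold pvStepA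
      simp only
      rw [if_neg (by omega), if_neg (by omega)]
    rw [List.foldl_cons, hstep]
    split_ifs with h
    · exact ih y v w (fun z hz => hub z (by simp [hz])) hy hv
    · exact ih g v w (fun z hz => hub z (by simp [hz])) hg hv

theorem pv_tight_main (arr : List Int) (hd : D_my_tests_three arr) :
    my_tests_three arr ≠ my_tests_three_alt arr := by
  obtain ⟨k, hk, h1, h2, h3, h4, h5⟩ := hd
  have hk' : k < arr.length := List.mem_range.mp hk
  set p := arr.take k with hp_def
  set M := p.foldl max 0 with hM_def
  set x := arr.getD k 0 with hx_def
  set r := arr.drop (k + 1) with hr_def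
  have hxk : x = arr[k] := by
    rw [hx_def]
    simp [List.getD_eq_getElem?_getD, List.getElem?_eq_getElem hk']
  have harr : arr = p ++ x :: r := by
    rw [hp_def, hxk, hr_def, List.getElem_cons_drop]
    exact (List.take_append_drop k arr).symm
  -- counts split along arr = p ++ x :: r
  have hcsplit : arr.countP (fun y => decide (M < y)) =
      p.countP (fun y => decide (M < y)) + 1 + r.countP (fun y => decide (M < y)) := by
    rw [harr]
    simp [List.countP_append, h2]
    omega
  have hpub : ∀ y ∈ p, y ≤ M := by
    intro y hy
    have hz : p.countP (fun y => decide (M < y)) = 0 := by omega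
    have := List.countP_eq_zero.mp hz y hy
    simpa using this
  have hrub : ∀ y ∈ r, y < M := by
    intro y hy
    have hz : r.countP (fun y => decide (M < y)) = 0 := by omega
    have hle := List.countP_eq_zero.mp hz y hy
    have hne : y ≠ M := by
      intro hEq
      exact absurd (List.count_pos_iff.mpr (hEq ▸ hy)) (by omega)
    simp at hle
    omega
  -- p is nonempty : it holds two copies of M
  have hpne : p ≠ [] := by
    intro hnil
    rw [hnil] at h3
    simp at h3
  obtain ⟨h0, p', hp'⟩ := List.exists_cons_of_ne_nil hpne
  have hh0 : h0 ≤ M := hpub h0 (by simp [hp'])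
  -- run the counting invariant over p
  have hq0 : pvQ M (if h0 = M then 1 else 0) (0, 0, h0) := pv_initQ M h0 hh0 h1
  have hqk := pv_foldQ M p' (0, 0, h0) _ (fun y hy => hpub y (by simp [hp', hy])) hq0
  have hcnt : (if h0 = M then 1 else 0) + p'.count M = 2 := by
    have : p.count M = (if h0 = M then 1 else 0) + p'.count M := by
      rw [hp']
      simp only [List.count_cons, beq_iff_eq]
      split_ifs <;> omega
    omega
  rw [hcnt] at hqk
  set sk := p'.foldl pvStepA (0, 0, h0) with hsk_def
  obtain ⟨q1, q2, q3, q4, q5, q6, q7⟩ := hqk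
  have hbig : sk.2.2 = M := q5.mpr (by omega)
  have hbigger : sk.2.1 = M := q6.mpr (by omega)
  have hsmall : sk.1 < M := by
    by_cases h : sk.1 = M
    · exact absurd (q7 h) (by omega)
    · omega
  -- the drop step at x
  have hstepk : pvStepA sk x = (sk.1, M, x) := by
    obtain ⟨g, b, c⟩ := sk
    simp only at hbig hbigger hsmall ⊢
    subst hbig; subst hbigger
    unfold pvStepA
    simp only
    rw [if_pos (by omega), if_neg (by omega)]
  -- and the tail of the run keeps the deficit
  obtain ⟨g', hg'1, hg'2⟩ := pv_fold_low r sk.1 M x hrub hsmall h2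
  -- A's value
  have hA : my_tests_three arr = g' + M + x := by
    unfold my_tests_three
    simp only
    rw [PySem.List.foldl_pyRange_pyGetD arr 0 pvStepA _ (by norm_num : (0 : Int) ≤ 1)]
    have hdrop1 : List.drop (1 : Int).toNat arr = p' ++ x :: r := by
      rw [harr, hp']
      simp
    have hget0 : PySem.List.pyGetD arr 0 0 = h0 := by
      rw [harr, hp']
      simp [PySem.List.pyGetD_zero_cons]
    rw [hdrop1, hget0]
    rw [List.foldl_append, ← hsk_def, List.foldl_cons, hstepk, hg'1]
  -- B's value : the three largest of arr ++ [0,0] are x, M, M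
  have hMp : M ∈ p := List.count_pos_iff.mp (by omega)
  have hMe : M ∈ p.erase M := by
    have : (p.erase M).count M = 1 := by
      rw [List.count_erase_self, h3]
    exact List.count_pos_iff.mp (by omega)
  set p0 := (p.erase M).erase M with hp0_def
  have hpperm : p.Perm (M :: M :: p0) :=
    (List.perm_cons_erase hMp).trans (List.Perm.cons M (List.perm_cons_erase hMe))
  have hp0ub : ∀ y ∈ p0, y < M := by
    intro y hy
    have hyp : y ∈ p := List.mem_of_mem_erase (List.mem_of_mem_erase hy)
    have hle := hpub y hyp
    have hne : y ≠ M := by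
      intro hEq
      have : p0.count M = 0 := by
        rw [hp0_def, List.count_erase_self, List.count_erase_self, h3]
      exact absurd (List.count_pos_iff.mpr (hEq ▸ hy)) (by omega)
    omega
  set u := PySem.List.sorted (p0 ++ r ++ [0, 0]) (fun t => t) with hu_def
  have huperm : u.Perm (p0 ++ r ++ [0, 0]) := PySem.List.sorted_perm _ _ false
  have hB : my_tests_three_alt arr = M + (M + (x + 0)) := by
    have hperm : (u ++ [M, M, x]).Perm (arr ++ [0, 0]) := by
      rw [List.perm_iff_count]
      intro a
      have e1 := huperm.count_eq a
      have e2 := hpperm.count_eq a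
      rw [harr]
      simp only [List.count_append, List.count_cons, List.count_nil, beq_iff_eq] at e1 e2 ⊢
      split_ifs at * <;> omega
    have hupw : ∀ y ∈ u, y ≤ M := by
      intro y hy
      rcases List.mem_append.mp (huperm.mem_iff.mp hy) with h | h
      · rcases List.mem_append.mp h with h | h
        · exact le_of_lt (hp0ub y h)
        · exact le_of_lt (hrub y h)
      · simp at h
        omega
    have hpw : (u ++ [M, M, x]).Pairwise (· ≤ ·) := by
      rw [List.pairwise_append]
      refine ⟨by rw [hu_def]; exact PySem.List.sorted_pairwise (p0 ++ r ++ [0, 0]) (fun t => t),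
        by simp [List.pairwise_cons]; omega, ?_⟩
      intro y hy z hz
      have h1 := hupw y hy
      simp at hz
      rcases hz with rfl | rfl | rfl <;> omega
    have := pv_alt_eq arr u [M, M, x] (by simp) hperm hpw
    simpa using this
  rw [hA, hB]
  omega

-- ===== VERDICT (by name: the statement is the Claim_ definition above) =====
theorem my_tests_three_spec : Claim_unchanged_my_tests_three := by
  intro arr _ hpre hnd
  show my_tests_three arr = my_tests_three_alt arr
  obtain ⟨h0, t, rfl⟩ := List.exists_cons_of_ne_nil hpre
  unfold my_tests_three
  simp only
  rw [PySem.List.foldl_pyRange_pyGetD (h0 :: t) 0 pvStepA _ (by norm_num : (0 : Int) ≤ 1)]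
  have hdrop : List.drop (1 : Int).toNat (h0 :: t) = t := by simp
  have hget : PySem.List.pyGetD (h0 :: t) 0 0 = h0 := by
    simp [PySem.List.pyGetD_zero_cons]
  rw [hdrop, hget]
  have hinv : pvInv [h0] t (0, 0, h0) := by
    by_cases hc : h0 < 0
    · left
      exact ⟨rfl, rfl, hc, [], by simp, by simpa [pv_pw3] using by omega⟩
    · right; left
      refine ⟨le_refl 0, [], ?_, ?_⟩
      · simp only [List.nil_append]
        exact (List.perm_append_singleton h0 [0, 0]).trans (by simp)
      · simpa [pv_pw3] using by omega
  have hmain := pv_main (h0 :: t) hnd t [h0] (0, 0, h0) rfl hinv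
  exact (pv_final (h0 :: t) _ hmain).symm

theorem my_tests_three_changed : Claim_changed_my_tests_three := by
  unfold Claim_changed_my_tests_three; decide

theorem my_tests_three_tight : Claim_exact_my_tests_three := by
  intro arr _ _ hd
  exact pv_tight_main arr hd
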